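-- pv_equiv track=rewrite | github.com/bb031204/AdaGeoHyper-TKAN | utils/data_loader.py | resolve_context_indices
-- ===== SOURCE A (Python) =====
-- from typing import Optional, Tuple, List, Dict, Any
--
-- CONTEXT_FEATURE_ORDER = [
--     "year",      # 0
--     "month",     # 1
--     "day",       # 2
--     "time",      # 3 (time index in window)
--     "region",    # 4 (land coverage / land-sea mask-like feature)
--     "altitude",  # 5
--     "latitude",  # 6
--     "longitude", # 7
-- ]
--
-- def resolve_context_indices(context_features: Optional[Dict[str, bool]]) -> Tuple[List[int], List[str]]:
--     """
--     Parse config flags to selected context channel indices.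
--
--     Supported keys:
--       use_year/use_month/use_day/use_time/use_region/use_altitude/use_longitude/use_latitude
--     """
--     if context_features is None:
--         return [], []
--
--     key_map = {
--         "use_year": 0,
--         "use_month": 1,
--         "use_day": 2,
--         "use_time": 3,
--         "use_region": 4,
--         "use_altitude": 5,
--         "use_latitude": 6,
--         "use_longitude": 7,
--     }
--
--     selected = [idx for key, idx in key_map.items() if bool(context_features.get(key, False))]
--     selected_names = [CONTEXT_FEATURE_ORDER[i] for i in selected]
--     return selected, selected_names
-- ===== SOURCE B (Python) =====
-- from typing import Optional, Tuple, List, Dict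
--
-- CONTEXT_FEATURE_ORDER = [
--     "year", "month", "day", "time",
--     "region", "altitude", "latitude", "longitude",
-- ]
--
-- def resolve_context_indices(context_features: Optional[Dict[str, bool]]) -> Tuple[List[int], List[str]]:
--     # Inverted traversal: scan the provided dict once, collect the set of
--     # selected channel indices, sort it, then read the names off the order list.
--     if context_features is None:
--         return [], []
--     pos = {"use_" + name: i for i, name in enumerate(CONTEXT_FEATURE_ORDER)}
--     chosen = sorted({pos[key] for key, value in context_features.items()
--                      if value and key in pos})
--     return chosen, [CONTEXT_FEATURE_ORDER[i] for i in chosen]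
-- ===== Notes on version B (the rewrite author's own statement) =====
-- stated objective: alternative
-- what changed: Inverts the traversal: instead of probing the dict once per key_map entry and then a second pass for names, B scans the dict's items once, collects the set of selected channel indices via a name-derived position table, sorts it, and reads the names off CONTEXT_FEATURE_ORDER; Pre_ only states the dict representation invariant (distinct keys), which every Python dict satisfies.
import Mathlib
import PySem

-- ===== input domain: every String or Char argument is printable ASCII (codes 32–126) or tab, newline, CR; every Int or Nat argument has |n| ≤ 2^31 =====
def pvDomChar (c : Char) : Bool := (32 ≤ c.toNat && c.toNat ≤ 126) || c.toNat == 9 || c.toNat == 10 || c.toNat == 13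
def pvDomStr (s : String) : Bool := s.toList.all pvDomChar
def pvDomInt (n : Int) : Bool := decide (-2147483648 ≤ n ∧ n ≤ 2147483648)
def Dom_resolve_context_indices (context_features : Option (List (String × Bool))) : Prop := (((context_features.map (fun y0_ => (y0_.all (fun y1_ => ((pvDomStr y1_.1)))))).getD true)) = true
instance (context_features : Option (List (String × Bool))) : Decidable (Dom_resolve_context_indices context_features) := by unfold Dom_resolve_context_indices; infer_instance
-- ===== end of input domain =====

-- B inverts the traversal: one scan over the dict's items collecting a set of indices,
-- then sort and read names off the order list (objective: alternative; not faster).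

-- ===== PORT A =====
def pvContextFeatureOrder : List String :=
  ["year", "month", "day", "time", "region", "altitude", "latitude", "longitude"]

def pvKeyMap : List (String × Int) :=
  [("use_year", 0), ("use_month", 1), ("use_day", 2), ("use_time", 3),
   ("use_region", 4), ("use_altitude", 5), ("use_latitude", 6), ("use_longitude", 7)]

def resolve_context_indices (context_features : Option (List (String × Bool))) : List Int × List String :=
  match context_features with
  | none => ([], [])
  | some d =>
    let selected : List Int :=
      (pvKeyMap.filter (fun kv => PySem.Dict.getD ⟨d⟩ kv.1 false)).map (fun kv => kv.2)
    -- CONTEXT_FEATURE_ORDER[i]: every i in key_map is in range, so the getD "" default is never used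
    let selected_names : List String :=
      selected.map (fun i => (PySem.List.pyGet? pvContextFeatureOrder i).getD "")
    (selected, selected_names)

-- ===== PORT B =====
-- pos = {"use_" + name: i for i, name in enumerate(CONTEXT_FEATURE_ORDER)}
def pvUsePos : PySem.Dict String Int :=
  ⟨(PySem.List.enumerate pvContextFeatureOrder).map (fun p => ("use_" ++ p.2, p.1))⟩

def resolve_context_indices_alt (context_features : Option (List (String × Bool))) : List Int × List String :=
  match context_features with
  | none => ([], [])
  | some d =>
    -- chosen = sorted({pos[key] for key, value in d.items() if value and key in pos})
    -- pos[key] is guarded by 'key in pos', so the getD default 0 is never used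
    let chosen : List Int :=
      PySem.List.sorted
        (PySem.Set.ofList
          ((d.filter (fun kv => kv.2 && PySem.Dict.contains pvUsePos kv.1)).map
            (fun kv => PySem.Dict.getD pvUsePos kv.1 0)))
        (fun x => x) false
    (chosen, chosen.map (fun i => (PySem.List.pyGet? pvContextFeatureOrder i).getD ""))

-- ===== PRECONDITION & SPEC =====
-- Pre_ states the Python-dict representation invariant: the association list has pairwise
-- distinct keys. Every actual Python dict satisfies it; duplicate-key lists encode no dict.
def Pre_resolve_context_indices (context_features : Option (List (String × Bool))) : Prop :=
  ((context_features.getD []).map Prod.fst).Nodup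
instance (context_features : Option (List (String × Bool))) : Decidable (Pre_resolve_context_indices context_features) := by unfold Pre_resolve_context_indices; infer_instance

def pvWitness_resolve_context_indices : (Option (List (String × Bool))) :=
  some [("use_month", true), ("use_year", false), ("use_time", true), ("extra", true)]

def Spec_resolve_context_indices (context_features : Option (List (String × Bool))) (out : List Int × List String) : Prop := out = resolve_context_indices_alt context_features
instance (context_features : Option (List (String × Bool))) (out : List Int × List String) : Decidable (Spec_resolve_context_indices context_features out) := by unfold Spec_resolve_context_indices; infer_instance

-- ===== CLAIM (what is proved, stated in full; the proofs are below) =====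
def Claim_equal_resolve_context_indices : Prop := ∀ (context_features : Option (List (String × Bool))), Dom_resolve_context_indices context_features → Pre_resolve_context_indices context_features → Spec_resolve_context_indices context_features (resolve_context_indices context_features)

-- ===== LEMMAS AND PROOFS =====

-- characterisation of the literal lookup table pvUsePos: its successful lookups are exactly A's key_map pairs
lemma pvUsePos_char (k : String) (i : Int) :
    (PySem.Dict.contains pvUsePos k = true ∧ PySem.Dict.getD pvUsePos k 0 = i) ↔
    ((k, i) ∈ pvKeyMap) := by
  have h : pvUsePos = ⟨pvKeyMap⟩ := by decide
  rw [h]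
  constructor
  · rintro ⟨hc, hg⟩
    rw [PySem.Dict.contains_iff_mem_keys] at hc
    simp [PySem.Dict.keys_mk, pvKeyMap] at hc
    rcases hc with h|h|h|h|h|h|h|h <;> subst h <;>
      simp only [PySem.Dict.getD_eq_get?_getD] at hg <;> subst hg <;> simp [pvKeyMap] <;> decide
  · intro hm
    simp [pvKeyMap] at hm
    rcases hm with ⟨h1,h2⟩|⟨h1,h2⟩|⟨h1,h2⟩|⟨h1,h2⟩|⟨h1,h2⟩|⟨h1,h2⟩|⟨h1,h2⟩|⟨h1,h2⟩ <;>
      subst h1 <;> subst h2 <;> exact ⟨by decide, by decide⟩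

-- first-match lookup on a nodup-keyed dict is list membership
lemma getD_true_iff_mem (d : List (String × Bool)) (hd : (d.map Prod.fst).Nodup) (k : String) :
    PySem.Dict.getD ⟨d⟩ k false = true ↔ (k, true) ∈ d := by
  have hnd : (PySem.Dict.mk d).keys.Nodup := by simpa [PySem.Dict.keys_mk] using hd
  have hiff := PySem.Dict.get?_eq_some_iff_mem_items (d := (⟨d⟩ : PySem.Dict String Bool)) (k := k) (v := true) hnd
  rw [PySem.Dict.getD_eq_get?_getD]
  constructor
  · intro h
    cases hg : PySem.Dict.get? (⟨d⟩ : PySem.Dict String Bool) k with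
    | none => rw [hg] at h; simp at h
    | some v =>
      rw [hg] at h; simp at h; subst h
      exact hiff.mp hg
  · intro hm
    rw [hiff.mpr hm]; rfl

-- B's sorted set of indices is exactly A's filtered key_map column
lemma chosen_eq (d : List (String × Bool)) (hd : (d.map Prod.fst).Nodup) :
    PySem.List.sorted
        (PySem.Set.ofList
          ((d.filter (fun kv => kv.2 && PySem.Dict.contains pvUsePos kv.1)).map
            (fun kv => PySem.Dict.getD pvUsePos kv.1 0)))
        (fun x => x) false
      = (pvKeyMap.filter (fun kv => PySem.Dict.getD ⟨d⟩ kv.1 false)).map (fun kv => kv.2) := by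
  set S := (pvKeyMap.filter (fun kv => PySem.Dict.getD ⟨d⟩ kv.1 false)).map (fun kv => kv.2) with hS
  set L := (d.filter (fun kv => kv.2 && PySem.Dict.contains pvUsePos kv.1)).map
            (fun kv => PySem.Dict.getD pvUsePos kv.1 0) with hL
  have hpair : S.Pairwise (fun a b => a < b) := by
    have hsub : S.Sublist (pvKeyMap.map (fun kv : String × Int => kv.2)) :=
      List.Sublist.map (fun kv : String × Int => kv.2) List.filter_sublist
    exact (by decide : (pvKeyMap.map (fun kv : String × Int => kv.2)).Pairwise (· < ·)).sublist hsub
  have hmem : ∀ i : Int, i ∈ S ↔ i ∈ PySem.Set.ofList L := by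
    intro i
    rw [PySem.Set.mem_ofList, hS, hL]
    simp only [List.mem_map, List.mem_filter, Bool.and_eq_true]
    constructor
    · rintro ⟨⟨k, j⟩, ⟨hkm, hget⟩, rfl⟩
      have hpos := (pvUsePos_char k j).mpr hkm
      exact ⟨(k, true), ⟨(getD_true_iff_mem d hd k).mp hget, rfl, hpos.1⟩, hpos.2⟩
    · rintro ⟨⟨k, v⟩, ⟨hkd, hv, hc⟩, rfl⟩
      have hki : (k, PySem.Dict.getD pvUsePos k 0) ∈ pvKeyMap := (pvUsePos_char k _).mp ⟨hc, rfl⟩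
      refine ⟨(k, PySem.Dict.getD pvUsePos k 0), ⟨hki, ?_⟩, rfl⟩
      cases hv
      exact (getD_true_iff_mem d hd k).mpr hkd
  have hperm : S.Perm (PySem.Set.ofList L) := by
    rw [List.perm_ext_iff_of_nodup (hpair.imp ne_of_lt) (PySem.Set.nodup_ofList L)]
    exact hmem
  exact PySem.List.sorted_eq_of_perm_of_pairwise_lt _ _ _ hperm hpair

-- ===== VERDICT (by name: the statement is the Claim_ definition above) =====
theorem resolve_context_indices_spec : Claim_equal_resolve_context_indices := by
  intro cf _ hpre
  unfold Spec_resolve_context_indices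
  cases cf with
  | none => rfl
  | some d =>
    have hd : (d.map Prod.fst).Nodup := by
      simpa [Pre_resolve_context_indices] using hpre
    simp only [resolve_context_indices, resolve_context_indices_alt]
    exact congrArg
      (fun l : List Int => (l, l.map (fun i => (PySem.List.pyGet? pvContextFeatureOrder i).getD "")))
      (chosen_eq d hd).symm
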